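-- pv_equiv track=rewrite | github.com/kyleglowacki/SudokuSolver | ss.py | is_valid_set
-- ===== SOURCE A (Python) =====
-- def is_valid_set(numbers):
--     seen = set()
--     for num in numbers:
--         if num is not None:
--             if num in seen:
--                 return False
--             seen.add(num)
--     return True
-- ===== SOURCE B (Python) =====
-- def is_valid_set(numbers):
--     filtered = sorted(n for n in numbers if n is not None)
--     return all(a != b for a, b in zip(filtered, filtered[1:]))
-- ===== Notes on version B (the rewrite author's own statement) =====
-- stated objective: alternative
-- what changed: Replaces the hash-set streaming scan with early exit by sort-then-adjacent-scan: sort the non-None values and check that no two neighbouring elements are equal (duplicates are adjacent after sorting).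
import Mathlib
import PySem

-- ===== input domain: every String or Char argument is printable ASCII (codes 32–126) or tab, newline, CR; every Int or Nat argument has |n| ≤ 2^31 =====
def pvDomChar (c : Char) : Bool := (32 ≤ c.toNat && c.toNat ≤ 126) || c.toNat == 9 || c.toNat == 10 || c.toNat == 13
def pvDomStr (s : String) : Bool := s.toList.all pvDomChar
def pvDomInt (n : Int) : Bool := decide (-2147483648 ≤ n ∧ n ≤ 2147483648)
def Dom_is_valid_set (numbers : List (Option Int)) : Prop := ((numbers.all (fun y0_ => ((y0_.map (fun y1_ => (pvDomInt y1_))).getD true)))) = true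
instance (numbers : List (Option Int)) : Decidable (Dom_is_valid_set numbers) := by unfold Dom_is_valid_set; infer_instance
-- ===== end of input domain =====

-- B replaces A's hash-set streaming scan with early exit by a different algorithm:
-- sort the non-None values and check that no two adjacent elements are equal; objective: alternative.

-- ===== PORT A =====
-- the for-loop over numbers with its accumulated 'seen' set and early 'return False'
def pvLoopA : List (Option Int) → PySem.Set Int → Bool
  | [], _ => true
  | num :: rest, seen =>
    match num with
    | none => pvLoopA rest seen
    | some n =>
      if PySem.Set.contains seen n then false
      else pvLoopA rest (PySem.Set.add seen n)

def is_valid_set (numbers : List (Option Int)) : Bool :=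
  pvLoopA numbers PySem.Set.empty

-- ===== PORT B =====
def is_valid_set_alt (numbers : List (Option Int)) : Bool :=
  let filtered := PySem.List.sorted (numbers.filterMap id) (fun x => x) false
  (filtered.zip filtered.tail).all (fun p => p.1 != p.2)

-- ===== PRECONDITION & SPEC =====
def Spec_is_valid_set (numbers : List (Option Int)) (out : Bool) : Prop := out = is_valid_set_alt numbers
instance (numbers : List (Option Int)) (out : Bool) : Decidable (Spec_is_valid_set numbers out) := by unfold Spec_is_valid_set; infer_instance

-- ===== CLAIM (what is proved, stated in full; the proofs are below) =====
def Claim_equal_is_valid_set : Prop := ∀ (numbers : List (Option Int)), Dom_is_valid_set numbers → Spec_is_valid_set numbers (is_valid_set numbers)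

-- ===== LEMMAS AND PROOFS =====

-- A's loop answers: the remaining non-None values are duplicate-free and disjoint from 'seen'.
theorem pv_loop_eq (xs : List (Option Int)) (seen : PySem.Set Int) :
    pvLoopA xs seen =
      decide ((xs.filterMap id).Nodup ∧ ∀ n ∈ xs.filterMap id, n ∉ seen) := by
  induction xs generalizing seen with
  | nil => simp [pvLoopA]
  | cons num rest ih =>
    match num with
    | none =>
      show pvLoopA rest seen = _
      rw [ih]
      rfl
    | some n =>
      show (if PySem.Set.contains seen n then false else pvLoopA rest (PySem.Set.add seen n)) = _
      by_cases hm : n ∈ seen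
      · rw [if_pos (PySem.Set.contains_iff seen n |>.mpr hm)]
        symm
        simp only [decide_eq_false_iff_not]
        intro ⟨_, hall⟩
        exact hall n (by simp) hm
      · rw [if_neg (by simpa using (not_congr (PySem.Set.contains_iff seen n)).mpr hm)]
        rw [ih]
        congr 1
        apply propext
        simp only [List.filterMap_cons, id, List.nodup_cons, List.mem_cons, PySem.Set.mem_add]
        constructor
        · rintro ⟨hnd, hall⟩
          refine ⟨⟨fun hn => (hall n hn (Or.inr rfl)).elim, hnd⟩, ?_⟩
          rintro m (rfl | hmr)
          · exact hm
          · intro hms; exact hall m hmr (Or.inl hms)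
        · rintro ⟨⟨hn, hnd⟩, hall⟩
          refine ⟨hnd, fun m hmr => ?_⟩
          rintro (hms | rfl)
          · exact hall m (Or.inr hmr) hms
          · exact hn hmr

-- For a ≤-sorted list, adjacent pairs all-distinct ⟺ no duplicates.
theorem pv_chain_eq_nodup (l : List Int) (hs : l.Pairwise (· ≤ ·)) :
    ((l.zip l.tail).all (fun p => p.1 != p.2)) = decide l.Nodup := by
  induction l with
  | nil => simp
  | cons x t ih =>
    match t with
    | [] => simp
    | y :: t' =>
      have hs' : (y :: t').Pairwise (· ≤ ·) := hs.tail
      have hxle : ∀ z ∈ y :: t', x ≤ z := fun z hz => (List.pairwise_cons.mp hs).1 z hz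
      have hyle : ∀ z ∈ t', y ≤ z := fun z hz => (List.pairwise_cons.mp hs').1 z hz
      show ((x, y) :: (y :: t').zip t').all (fun p => p.1 != p.2) = _
      have ih' := ih hs'
      simp only [List.tail_cons] at ih'
      rw [List.all_cons, ih']
      by_cases hxy : x = y
      · subst hxy
        simp
      · have hxnot : x ∉ y :: t' := by
          intro hx
          rcases List.mem_cons.mp hx with rfl | hxt
          · exact hxy rfl
          · have h1 : x ≤ y := hxle y (by simp)
            have h2 : y ≤ x := hyle x hxt
            exact hxy (le_antisymm h1 h2)
        simp [hxy, hxnot]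

-- ===== VERDICT (by name: the statement is the Claim_ definition above) =====
theorem is_valid_set_spec : Claim_equal_is_valid_set := by
  intro numbers _
  unfold Spec_is_valid_set is_valid_set is_valid_set_alt
  rw [pv_loop_eq]
  rw [pv_chain_eq_nodup _ (by simpa using PySem.List.sorted_pairwise (numbers.filterMap id) (fun x => x) )]
  have hperm := PySem.List.sorted_perm (numbers.filterMap id) (fun x : Int => x) false
  simp only [PySem.Set.empty, List.not_mem_nil, not_false_eq_true, implies_true, and_true]
  exact decide_eq_decide.mpr hperm.nodup_iff.symm
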